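-- pv_equiv track=rewrite | github.com/bijon1161/Hackerrank-3-months-preparation-kit- | Week01(Problem04).py | breakingRecordsMax
-- ===== SOURCE A (Python) =====
-- def breakingRecordsMax(scores):
--     s1=sorted(scores)
--     s1.reverse()
--     s=list(dict.fromkeys(s1))
--
--     if(s[0]==scores[0]):
--         result=0
--
--     else:
--
--         p=len(scores)
--         ct=0
--         maxi=scores[0]
--         for i in range(1,p):
--
--             if maxi<scores[i]:
--                 ct+=1
--                 maxi=scores[i]
--
--             else:
--                 continue
--         result=ct
--     return result
-- ===== SOURCE B (Python) =====
-- def breakingRecordsMax(scores):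
--     ct = 0
--     maxi = scores[0]
--     for x in scores:
--         if x > maxi:
--             ct += 1
--             maxi = x
--     return ct
-- ===== Notes on version B (the rewrite author's own statement) =====
-- stated objective: faster
-- what changed: Drops A's sort/reverse/dedup max-detection entirely: B is a single linear pass over the list tracking the running maximum and counting increases.
import Mathlib
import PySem

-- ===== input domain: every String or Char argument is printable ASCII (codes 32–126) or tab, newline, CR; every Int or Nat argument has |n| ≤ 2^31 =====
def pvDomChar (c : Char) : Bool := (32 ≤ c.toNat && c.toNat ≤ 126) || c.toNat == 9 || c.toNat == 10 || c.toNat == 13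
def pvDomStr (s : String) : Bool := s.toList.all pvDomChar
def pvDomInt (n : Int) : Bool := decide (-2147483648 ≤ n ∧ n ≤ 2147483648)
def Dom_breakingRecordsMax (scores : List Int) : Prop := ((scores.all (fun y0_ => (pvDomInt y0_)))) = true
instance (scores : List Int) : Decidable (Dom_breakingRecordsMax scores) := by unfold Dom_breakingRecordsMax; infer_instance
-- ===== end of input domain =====

-- B replaces A's sort/reverse/dedup maximum detection by a single linear pass
-- tracking the running maximum (objective: faster, O(n) instead of O(n log n)).

-- ===== PORT A =====
def breakingRecordsMax (scores : List Int) : Int :=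
  let s1 := PySem.List.sorted scores (fun x => x) false
  let s1r := s1.reverse
  let s := PySem.List.dedup s1r
  if PySem.List.pyGetD s 0 0 = PySem.List.pyGetD scores 0 0 then
    0
  else
    let p : Int := scores.length
    let loop := (PySem.List.pyRange 1 p 1).foldl
      (fun (st : Int × Int) i =>
        if st.2 < PySem.List.pyGetD scores i 0 then
          (st.1 + 1, PySem.List.pyGetD scores i 0)
        else st)
      (0, PySem.List.pyGetD scores 0 0)
    loop.1

-- ===== PORT B =====
def breakingRecordsMax_alt (scores : List Int) : Int :=
  (scores.foldl
    (fun (st : Int × Int) x => if st.2 < x then (st.1 + 1, x) else st)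
    (0, PySem.List.pyGetD scores 0 0)).1

-- ===== PRECONDITION & SPEC =====
-- Python A raises IndexError on the empty list (s[0] / scores[0]); B raises there too.
def Pre_breakingRecordsMax (scores : List Int) : Prop := scores ≠ []
instance (scores : List Int) : Decidable (Pre_breakingRecordsMax scores) := by unfold Pre_breakingRecordsMax; infer_instance
def pvWitness_breakingRecordsMax : List Int := [3, 1, 4]

def Spec_breakingRecordsMax (scores : List Int) (out : Int) : Prop := out = breakingRecordsMax_alt scores
instance (scores : List Int) (out : Int) : Decidable (Spec_breakingRecordsMax scores out) := by unfold Spec_breakingRecordsMax; infer_instance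

-- ===== CLAIM (what is proved, stated in full; the proofs are below) =====
def Claim_equal_breakingRecordsMax : Prop := ∀ (scores : List Int), Dom_breakingRecordsMax scores → Pre_breakingRecordsMax scores → Spec_breakingRecordsMax scores (breakingRecordsMax scores)

-- ===== LEMMAS AND PROOFS =====

-- PySem.Set.ofList (and hence PySem.List.dedup) keeps the first element of a nonempty list first.
theorem head_foldl_add {α : Type} [BEq α] (ys : List α) (x : α) (acc : List α) :
    (List.foldl PySem.Set.add (x :: acc) ys).head? = some x := by
  induction ys generalizing acc with
  | nil => rfl
  | cons y t ih =>
    simp only [List.foldl_cons, PySem.Set.add]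
    split
    · exact ih acc
    · rw [show (x :: acc) ++ [y] = x :: (acc ++ [y]) by simp]
      exact ih (acc ++ [y])

theorem dedup_head {α : Type} [BEq α] (x : α) (xs : List α) :
    (PySem.List.dedup (x :: xs)).head? = some x := by
  simp only [PySem.List.dedup, PySem.Set.ofList, List.foldl_cons]
  have : PySem.Set.empty.add x = [x] := by simp [PySem.Set.add, PySem.Set.empty]
  rw [this]
  exact head_foldl_add xs x []

-- If every element of t is ≤ the current maximum, the counting fold does nothing.
theorem fold_no_increase (t : List Int) (c m : Int) (h : ∀ y ∈ t, y ≤ m) :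
    t.foldl (fun (st : Int × Int) x => if st.2 < x then (st.1 + 1, x) else st) (c, m) = (c, m) := by
  induction t with
  | nil => rfl
  | cons y r ih =>
    have hy : y ≤ m := h y (List.mem_cons_self)
    simp only [List.foldl_cons]
    rw [if_neg (by simpa using not_lt.mpr hy)]
    exact ih (fun z hz => h z (List.mem_cons_of_mem _ hz))

-- ===== VERDICT (by name: the statement is the Claim_ definition above) =====
theorem breakingRecordsMax_spec : Claim_equal_breakingRecordsMax := by
  intro scores _ hpre
  unfold Spec_breakingRecordsMax breakingRecordsMax breakingRecordsMax_alt
  cases scores with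
  | nil => exact absurd rfl hpre
  | cons h t =>
    -- name the sorted list, its reverse, and the head of the reverse (the maximum)
    set l := PySem.List.sorted (h :: t) (fun x => x) false with hl
    have hlne : l ≠ [] := by
      rw [hl]; simp [PySem.List.sorted_eq_nil_iff]
    have hrne : l.reverse ≠ [] := by simpa using hlne
    obtain ⟨m, rest, hrl⟩ := List.exists_cons_of_ne_nil hrne
    -- m is ≥ every element of the list
    have hmax : ∀ y ∈ h :: t, y ≤ m := by
      intro y hy
      have hyl : y ∈ l := by rw [hl, PySem.List.mem_sorted]; exact hy
      have hyr : y ∈ m :: rest := by rw [← hrl]; simpa using hyl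
      have hpw : (m :: rest).Pairwise (fun a b => b ≤ a) := by
        rw [← hrl, List.pairwise_reverse]
        exact PySem.List.sorted_pairwise (h :: t) (fun x => x)
      rcases List.mem_cons.mp hyr with hym | hyr'
      · exact le_of_eq hym
      · exact (List.pairwise_cons.mp hpw).1 y hyr'
    -- the head of the dedup'd reversed sorted list is m
    have hhead : PySem.List.pyGetD (PySem.List.dedup l.reverse) 0 0 = m := by
      rw [hrl, PySem.List.pyGetD_zero]
      have := dedup_head m rest
      cases hd : PySem.List.dedup (m :: rest) with
      | nil => rw [hd] at this; simp at this
      | cons a r => rw [hd] at this; simp at this; simp [this]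
    -- B's fold: the first step leaves the state unchanged
    have hB : (h :: t).foldl
        (fun (st : Int × Int) x => if st.2 < x then (st.1 + 1, x) else st) (0, h)
        = t.foldl (fun (st : Int × Int) x => if st.2 < x then (st.1 + 1, x) else st) (0, h) := by
      simp
    simp only [hhead, PySem.List.pyGetD_zero_cons, hB]
    split
    · -- m = h: h is the maximum, the counting fold never increments
      next heq =>
        have : ∀ y ∈ t, y ≤ h := fun y hy => heq ▸ hmax y (List.mem_cons_of_mem _ hy)
        rw [fold_no_increase t 0 h this]
    · -- m ≠ h: A's indexed loop is B's fold over the tail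
      rw [PySem.List.foldl_pyRange_pyGetD' (h :: t) 0
        (fun (st : Int × Int) x => if st.2 < x then (st.1 + 1, x) else st) (0, h)
        (a := 1) (by norm_num)]
      rfl
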